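-- pv_equiv track=rewrite | github.com/zhangxinyu-xyz/MVAA | preprocess/motion_music_alignment.py | match_beats_to_motion
-- ===== SOURCE A (Python) =====
-- def match_beats_to_motion(music_beats, motion_peaks):
--     """
--     Matches each music beat to the closest unused motion peak in time order.
--     Ensures one-to-one matching without repetition.
--     """
--     matched = []
--     used_indices = set()
--
--     for b in music_beats:
--         min_dist = float("inf")
--         chosen_idx = -1
--         for i, mp in enumerate(motion_peaks):
--             if i in used_indices:
--                 continue
--             dist = abs(b - mp)
--             if dist < min_dist:
--                 min_dist = dist
--                 chosen_idx = i
--         if chosen_idx != -1: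
--             used_indices.add(chosen_idx)
--             matched.append((b, motion_peaks[chosen_idx]))
--     return matched
-- ===== SOURCE B (Python) =====
-- def match_beats_to_motion(music_beats, motion_peaks):
--     """
--     Matches each music beat to the closest unused motion peak in time order.
--     Keeps the unused peaks in a shrinking list (original order preserved)
--     instead of a used-index set, so each beat scans only what is still
--     available and the chosen peak is popped out.
--     """
--     matched = []
--     remaining = list(motion_peaks)
--     for b in music_beats:
--         if not remaining:
--             break
--         j = min(range(len(remaining)), key=lambda k: abs(b - remaining[k]))
--         matched.append((b, remaining.pop(j)))
--     return matched
-- ===== Notes on version B (the rewrite author's own statement) =====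
-- stated objective: alternative
-- what changed: B drops A's used-index set and full rescan of all peaks: it keeps the still-unused peaks in a shrinking list (order preserved), picks the first nearest remaining peak with min(range(len(remaining)), key=...) and pops it, so each beat scans only the peaks still available.
import Mathlib
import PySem

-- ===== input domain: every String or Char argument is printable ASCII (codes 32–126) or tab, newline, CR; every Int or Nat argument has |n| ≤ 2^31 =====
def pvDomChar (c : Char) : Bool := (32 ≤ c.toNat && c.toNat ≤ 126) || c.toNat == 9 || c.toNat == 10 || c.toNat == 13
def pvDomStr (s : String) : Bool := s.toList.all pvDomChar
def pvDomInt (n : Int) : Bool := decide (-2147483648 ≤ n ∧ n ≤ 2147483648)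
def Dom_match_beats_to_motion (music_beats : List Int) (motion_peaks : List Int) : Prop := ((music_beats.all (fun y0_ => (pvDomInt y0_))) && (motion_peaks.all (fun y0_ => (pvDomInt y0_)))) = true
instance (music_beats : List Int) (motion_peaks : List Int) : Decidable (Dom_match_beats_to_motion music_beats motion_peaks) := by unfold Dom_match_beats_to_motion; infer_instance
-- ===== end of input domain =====

-- B replaces A's used-index set + rescan of every peak by a shrinking list of the
-- still-unused peaks from which the first nearest one is popped (objective: alternative).

-- ===== PORT A =====
-- inner-loop body of A: min_dist = float("inf") is modelled by `none` (any dist < inf)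
def pvStepA (b : Int) (acc : Option Int × Int) (p : Int × Int) : Option Int × Int :=
  let dist := |b - p.2|
  match acc.1 with
  | none => (some dist, p.1)
  | some md => if dist < md then (some dist, p.1) else acc

-- one iteration of A's outer `for b in music_beats` loop; state = (matched, used_indices)
def pvBeatA (motion_peaks : List Int) (st : List (Int × Int) × PySem.Set Int) (b : Int) :
    List (Int × Int) × PySem.Set Int :=
  let inner := (PySem.List.enumerate motion_peaks).foldl
    (fun acc p => if p.1 ∈ st.2 then acc else pvStepA b acc p) (none, -1)
  if inner.2 ≠ -1 then
    -- motion_peaks[chosen_idx]: always in range when this branch is taken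
    (st.1 ++ [(b, PySem.List.pyGetD motion_peaks inner.2 0)], PySem.Set.add st.2 inner.2)
  else st

def match_beats_to_motion (music_beats : List Int) (motion_peaks : List Int) : List (Int × Int) :=
  (music_beats.foldl (pvBeatA motion_peaks) ([], PySem.Set.empty)).1

-- ===== PORT B =====
-- port of B's `min(range(len(remaining)), key=lambda k: abs(b - remaining[k]))` on x :: xs:
-- (position of the first element minimizing |b - ·|, that element)
def pvArgmin (b : Int) (x : Int) : List Int → Nat × Int
  | [] => (0, x)
  | y :: ys =>
    let r := pvArgmin b y ys
    if |b - r.2| < |b - x| then (r.1 + 1, r.2) else (0, x)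

-- one iteration of B's loop; state = (matched, remaining); `break` on empty remaining
-- is the identity step (remaining never grows back)
def pvBeatB (st : List (Int × Int) × List Int) (b : Int) : List (Int × Int) × List Int :=
  match st.2 with
  | [] => st
  | x :: xs =>
    let j := (pvArgmin b x xs).1
    match PySem.List.pop? (x :: xs) (j : Int) with
    | some r => (st.1 ++ [(b, r.1)], r.2)
    | none => st

def match_beats_to_motion_alt (music_beats : List Int) (motion_peaks : List Int) : List (Int × Int) :=
  (music_beats.foldl pvBeatB ([], motion_peaks)).1

-- ===== PRECONDITION & SPEC =====
def Spec_match_beats_to_motion (music_beats : List Int) (motion_peaks : List Int) (out : List (Int × Int)) : Prop := out = match_beats_to_motion_alt music_beats motion_peaks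
instance (music_beats : List Int) (motion_peaks : List Int) (out : List (Int × Int)) : Decidable (Spec_match_beats_to_motion music_beats motion_peaks out) := by unfold Spec_match_beats_to_motion; infer_instance

-- ===== CLAIM (what is proved, stated in full; the proofs are below) =====
def Claim_equal_match_beats_to_motion : Prop := ∀ (music_beats : List Int) (motion_peaks : List Int), Dom_match_beats_to_motion music_beats motion_peaks → Spec_match_beats_to_motion music_beats motion_peaks (match_beats_to_motion music_beats motion_peaks)

-- ===== LEMMAS AND PROOFS =====

-- the peaks still available given a set of used indices, in original order
def pvAvail (used : List Int) (motion_peaks : List Int) : List Int :=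
  ((PySem.List.enumerate motion_peaks).filter (fun p => decide (p.1 ∉ used))).map (·.2)

-- pair version of pvArgmin: (position, pair) of the first pair minimizing |b - ·.2|
def pvArgP (b : Int) (q : Int × Int) : List (Int × Int) → Nat × (Int × Int)
  | [] => (0, q)
  | r :: rs =>
    let s := pvArgP b r rs
    if |b - s.2.2| < |b - q.2| then (s.1 + 1, s.2) else (0, q)

theorem pvArgmin_map (b : Int) (q : Int × Int) (qs : List (Int × Int)) :
    pvArgmin b q.2 (qs.map (·.2)) = ((pvArgP b q qs).1, (pvArgP b q qs).2.2) := by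
  induction qs generalizing q with
  | nil => rfl
  | cons r rs ih =>
    simp only [List.map_cons, pvArgmin, pvArgP, ih r]
    split <;> rfl

theorem pvArgP_get (b : Int) (q : Int × Int) (qs : List (Int × Int)) :
    (q :: qs)[(pvArgP b q qs).1]? = some (pvArgP b q qs).2 := by
  induction qs generalizing q with
  | nil => rfl
  | cons r rs ih =>
    simp only [pvArgP]
    split
    · simpa using ih r
    · rfl

theorem pvFoldA_aux (b : Int) (qs : List (Int × Int)) :
    ∀ (q : Int × Int) (d : Int) (i : Int),
      List.foldl (pvStepA b) (some d, i) (q :: qs) =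
        if |b - (pvArgP b q qs).2.2| < d
        then (some |b - (pvArgP b q qs).2.2|, (pvArgP b q qs).2.1)
        else (some d, i) := by
  induction qs with
  | nil =>
    intro q d i
    simp [List.foldl, pvStepA, pvArgP]
  | cons r rs ih =>
    intro q d i
    rw [show List.foldl (pvStepA b) (some d, i) (q :: r :: rs) =
        List.foldl (pvStepA b) (pvStepA b (some d, i) q) (r :: rs) from rfl]
    simp only [pvStepA, pvArgP]
    by_cases h2 : |b - (pvArgP b r rs).2.2| < |b - q.2|
    · rw [if_pos h2]
      dsimp only
      by_cases h1 : |b - q.2| < d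
      · rw [if_pos h1, ih r, if_pos h2, if_pos (lt_trans h2 h1)]
      · rw [if_neg h1, ih r]
    · rw [if_neg h2]
      dsimp only
      by_cases h1 : |b - q.2| < d
      · rw [if_pos h1, ih r, if_neg h2]
      · rw [if_neg h1, ih r]
        split_ifs <;> first | rfl | (exfalso; omega)

theorem pvFoldA_eq (b : Int) (q : Int × Int) (qs : List (Int × Int)) :
    List.foldl (pvStepA b) ((none : Option Int), (-1 : Int)) (q :: qs) =
      (some |b - (pvArgP b q qs).2.2|, (pvArgP b q qs).2.1) := by
  have h0 : List.foldl (pvStepA b) ((none : Option Int), (-1 : Int)) (q :: qs) =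
      List.foldl (pvStepA b) (some |b - q.2|, q.1) qs := rfl
  rw [h0]
  cases qs with
  | nil => rfl
  | cons r rs =>
    rw [pvFoldA_aux b rs r]
    simp only [pvArgP]
    by_cases h2 : |b - (pvArgP b r rs).2.2| < |b - q.2|
    · rw [if_pos h2, if_pos h2]
    · rw [if_neg h2, if_neg h2]

theorem pvFilter_ne_eq_eraseIdx (l : List (Int × Int)) :
    ∀ (pos : Nat) (P : Int × Int), l.Pairwise (fun a c => a.1 < c.1) → l[pos]? = some P →
      l.filter (fun p => decide (p.1 ≠ P.1)) = l.eraseIdx pos := by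
  induction l with
  | nil => intro pos P _ h; simp at h
  | cons a t ih =>
    intro pos P hp hg
    cases pos with
    | zero =>
      simp only [List.getElem?_cons_zero, Option.some.injEq] at hg
      subst hg
      simp only [List.filter_cons, ne_eq, not_true_eq_false, decide_false,
        List.eraseIdx_cons_zero]
      rw [if_neg (by simp)]
      refine List.filter_eq_self.mpr ?_
      intro p hpmem
      have := (List.pairwise_cons.mp hp).1 p hpmem
      simp only [decide_eq_true_eq]
      omega
    | succ n =>
      simp only [List.getElem?_cons_succ] at hg
      have hPmem : P ∈ t := List.mem_of_getElem? hg
      have hlt : a.1 < P.1 := (List.pairwise_cons.mp hp).1 P hPmem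
      simp only [List.filter_cons, List.eraseIdx_cons_succ]
      rw [if_pos (by simp; omega)]
      rw [ih n P (List.pairwise_cons.mp hp).2 hg]

theorem pvMap_eraseIdx {α β : Type} (f : α → β) (l : List α) :
    ∀ (i : Nat), (l.eraseIdx i).map f = (l.map f).eraseIdx i := by
  induction l with
  | nil => intro i; simp
  | cons a t ih =>
    intro i
    cases i with
    | zero => simp
    | succ n => simp [ih n]

theorem pvSkip_fold (b : Int) (used : List Int) (mp : List Int) (init : Option Int × Int) :
    (PySem.List.enumerate mp).foldl
        (fun acc p => if p.1 ∈ used then acc else pvStepA b acc p) init =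
      ((PySem.List.enumerate mp).filter (fun p => decide (p.1 ∉ used))).foldl (pvStepA b) init := by
  rw [List.foldl_filter]
  congr 1
  funext acc p
  by_cases h : p.1 ∈ used
  · simp [h]
  · simp [h]

-- one-step correspondence: B's step on the available peaks mirrors A's step
theorem pvBeat_corr (mp : List Int) (matched : List (Int × Int)) (used : List Int) (b : Int) :
    pvBeatB (matched, pvAvail used mp) b =
      ((pvBeatA mp (matched, used) b).1, pvAvail (pvBeatA mp (matched, used) b).2 mp) := by
  have hAinner : (PySem.List.enumerate mp).foldl
      (fun acc p => if p.1 ∈ used then acc else pvStepA b acc p) (none, -1) =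
      ((PySem.List.enumerate mp).filter (fun p => decide (p.1 ∉ used))).foldl (pvStepA b)
        (none, -1) := pvSkip_fold b used mp _
  set qs := (PySem.List.enumerate mp).filter (fun p => decide (p.1 ∉ used)) with hqs
  have hqs_pw : qs.Pairwise (fun a c => a.1 < c.1) :=
    (PySem.List.pairwise_lt_enumerate mp 0).sublist List.filter_sublist
  cases hqsc : qs with
  | nil =>
    have havail : pvAvail used mp = [] := by
      simp only [pvAvail, ← hqs, hqsc, List.map_nil]
    have hA : pvBeatA mp (matched, used) b = (matched, used) := by
      simp only [pvBeatA, hAinner, hqsc, List.foldl_nil]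
      simp
    rw [hA, havail]
    simp [pvBeatB]
  | cons q qs' =>
    -- the chosen pair P and its position pos
    set P := (pvArgP b q qs').2 with hP
    set pos := (pvArgP b q qs').1 with hpos
    have hget : (q :: qs')[pos]? = some P := pvArgP_get b q qs'
    have hposlt : pos < qs'.length + 1 := by
      obtain ⟨h, -⟩ := List.getElem?_eq_some_iff.mp hget
      simpa using h
    have hPmem : P ∈ PySem.List.enumerate mp 0 := by
      have h1 : P ∈ q :: qs' := List.mem_of_getElem? hget
      rw [← hqsc] at h1
      exact List.mem_of_mem_filter h1
    obtain ⟨k, hk, hPk⟩ := (PySem.List.mem_enumerate_iff _ _ _).mp hPmem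
    have hP1 : P.1 = (k : Int) := by rw [hPk]; simp
    have hP2 : P.2 = mp[k] := by rw [hPk]
    -- A's inner loop result
    have hinner : (PySem.List.enumerate mp).foldl
        (fun acc p => if p.1 ∈ used then acc else pvStepA b acc p) (none, -1) =
        (some |b - P.2|, P.1) := by
      rw [hAinner, hqsc, pvFoldA_eq]
    have hPne : P.1 ≠ -1 := by rw [hP1]; omega
    -- A's step evaluates
    have hA : pvBeatA mp (matched, used) b =
        (matched ++ [(b, P.2)], PySem.Set.add used P.1) := by
      simp only [pvBeatA, hinner, if_pos hPne]
      congr 2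
      rw [hP1, hP2]
      simp [PySem.List.pyGetD_natCast, List.getD, hk]
    -- B's side: the available list, nonempty
    set vs : List Int := q.2 :: qs'.map (·.2) with hvs
    have havail : pvAvail used mp = vs := by
      simp only [pvAvail, ← hqs, hqsc, List.map_cons, hvs]
    have hmin : pvArgmin b q.2 (qs'.map (·.2)) = (pos, P.2) := pvArgmin_map b q qs'
    have hlen : pos < vs.length := by simp [hvs]; omega
    have hvsP : vs[pos]'hlen = P.2 := by
      have h2 : vs[pos]? = some P.2 := by
        rw [hvs, show (q.2 :: qs'.map (·.2)) = (q :: qs').map (·.2) from rfl,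
          List.getElem?_map, hget]
        rfl
      rw [List.getElem?_eq_getElem hlen] at h2
      exact Option.some.inj h2
    have hpop : PySem.List.pop? vs (pos : Int) = some (vs[pos]'hlen, vs.eraseIdx pos) :=
      PySem.List.pop?_natCast vs pos hlen
    -- B's step evaluates
    have hB : pvBeatB (matched, pvAvail used mp) b =
        (matched ++ [(b, P.2)], vs.eraseIdx pos) := by
      rw [havail, hvs]
      simp only [pvBeatB, hmin]
      rw [← hvs, hpop, hvsP]
    -- invariant: available peaks after adding P.1 = eraseIdx pos
    have hinv : pvAvail (PySem.Set.add used P.1) mp = vs.eraseIdx pos := by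
      have hfilter : (PySem.List.enumerate mp).filter
          (fun p => decide (p.1 ∉ PySem.Set.add used P.1)) =
          qs.filter (fun p => decide (p.1 ≠ P.1)) := by
        rw [hqs, List.filter_filter]
        apply List.filter_congr
        intro p _
        simp [PySem.Set.mem_add, not_or, and_comm]
      simp only [pvAvail, hfilter, hqsc]
      rw [pvFilter_ne_eq_eraseIdx (q :: qs') pos P (by rw [← hqsc]; exact hqs_pw) hget]
      rw [pvMap_eraseIdx]
      simp [hvs]
    rw [hB, hA, hinv]

theorem pvFold_corr (mp : List Int) (mb : List Int) :
    ∀ (matched : List (Int × Int)) (used : List Int),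
      (List.foldl (pvBeatA mp) (matched, used) mb).1 =
        (List.foldl pvBeatB (matched, pvAvail used mp) mb).1 := by
  induction mb with
  | nil => intro matched used; rfl
  | cons b bs ih =>
    intro matched used
    have h1 : List.foldl pvBeatB (matched, pvAvail used mp) (b :: bs) =
        List.foldl pvBeatB (pvBeatB (matched, pvAvail used mp) b) bs := rfl
    rw [h1, pvBeat_corr]
    have h2 : List.foldl (pvBeatA mp) (matched, used) (b :: bs) =
        List.foldl (pvBeatA mp) (pvBeatA mp (matched, used) b) bs := rfl
    rw [h2]
    have := ih (pvBeatA mp (matched, used) b).1 (pvBeatA mp (matched, used) b).2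
    simpa using this

-- ===== VERDICT (by name: the statement is the Claim_ definition above) =====
theorem match_beats_to_motion_spec : Claim_equal_match_beats_to_motion := by
  intro music_beats motion_peaks _
  unfold Spec_match_beats_to_motion match_beats_to_motion match_beats_to_motion_alt
  have h0 : pvAvail PySem.Set.empty motion_peaks = motion_peaks := by
    simp [pvAvail, PySem.Set.empty, PySem.List.map_snd_enumerate]
  rw [pvFold_corr motion_peaks music_beats [] PySem.Set.empty, h0]
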